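-- pv_equiv track=rewrite | github.com/andriy-pro/audit-friendly-bingo-generator | src/bingo_gen/constraints.py | violates_min_distance
-- ===== SOURCE A (Python) =====
-- from typing import List
--
-- def violates_min_distance(card_matrix: List[List[int]], min_distance: int) -> bool:
--     """Check if any two numbers on the same card are too close together."""
--     numbers = []
--     for row in card_matrix:
--         numbers.extend(row)
--
--     for i in range(len(numbers)):
--         for j in range(i + 1, len(numbers)):
--             if abs(numbers[i] - numbers[j]) < min_distance:
--                 return True
--     return False
-- ===== SOURCE B (Python) =====
-- from typing import List
--
-- def violates_min_distance(card_matrix: List[List[int]], min_distance: int) -> bool: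
--     """Check if any two numbers on the same card are too close together."""
--     nums = sorted(n for row in card_matrix for n in row)
--     return any(b - a < min_distance for a, b in zip(nums, nums[1:]))
-- ===== Notes on version B (the rewrite author's own statement) =====
-- stated objective: alternative
-- what changed: Instead of comparing every pair of numbers with nested index loops, B sorts the flattened numbers once and checks only adjacent differences, since the minimum pairwise distance is attained by an adjacent pair in sorted order.
import Mathlib
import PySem

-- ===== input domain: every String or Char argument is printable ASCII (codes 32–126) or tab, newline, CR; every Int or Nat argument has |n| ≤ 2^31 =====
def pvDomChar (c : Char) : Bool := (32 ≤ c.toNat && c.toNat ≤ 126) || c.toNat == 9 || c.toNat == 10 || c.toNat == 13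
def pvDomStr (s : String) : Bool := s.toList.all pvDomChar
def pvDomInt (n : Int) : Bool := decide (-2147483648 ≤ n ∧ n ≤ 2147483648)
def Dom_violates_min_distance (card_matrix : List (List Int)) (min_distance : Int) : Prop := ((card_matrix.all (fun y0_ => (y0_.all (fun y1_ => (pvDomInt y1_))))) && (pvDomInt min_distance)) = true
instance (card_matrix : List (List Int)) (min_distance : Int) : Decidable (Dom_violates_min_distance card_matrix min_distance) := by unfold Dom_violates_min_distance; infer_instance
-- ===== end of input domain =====

-- B detects a close pair by sorting the flattened numbers once and checking adjacent differences, instead of A's all-pairs nested loops; return values proved equal on all inputs.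

-- ===== PORT A =====
-- literal port of A: flatten by extend, then nested index loops with early return (any)
def violates_min_distance (card_matrix : List (List Int)) (min_distance : Int) : Bool :=
  let numbers : List Int := card_matrix.foldl (fun acc row => acc ++ row) []
  (PySem.List.pyRange 0 numbers.length 1).any (fun i =>
    (PySem.List.pyRange (i + 1) numbers.length 1).any (fun j =>
      decide (|PySem.List.pyGetD numbers i 0 - PySem.List.pyGetD numbers j 0| < min_distance)))

-- ===== PORT B =====
-- literal port of B: sort the flattened numbers, then any() over zip(nums, nums[1:])
def violates_min_distance_alt (card_matrix : List (List Int)) (min_distance : Int) : Bool :=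
  let nums : List Int := PySem.List.sorted card_matrix.flatten (fun x => x) false
  (nums.zip (PySem.List.slice nums (some 1) none)).any (fun p =>
    decide (p.2 - p.1 < min_distance))

-- ===== PRECONDITION & SPEC =====
def Spec_violates_min_distance (card_matrix : List (List Int)) (min_distance : Int) (out : Bool) : Prop := out = violates_min_distance_alt card_matrix min_distance
instance (card_matrix : List (List Int)) (min_distance : Int) (out : Bool) : Decidable (Spec_violates_min_distance card_matrix min_distance out) := by unfold Spec_violates_min_distance; infer_instance

-- ===== CLAIM (what is proved, stated in full; the proofs are below) =====
def Claim_equal_violates_min_distance : Prop := ∀ (card_matrix : List (List Int)) (min_distance : Int), Dom_violates_min_distance card_matrix min_distance → Spec_violates_min_distance card_matrix min_distance (violates_min_distance card_matrix min_distance)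

-- ===== LEMMAS AND PROOFS =====

-- A's nested loops detect exactly a violating pair of positions, i.e. ¬ Pairwise (far apart)
theorem vmd_A_char (l : List Int) (d : Int) :
    ((PySem.List.pyRange 0 l.length 1).any (fun i =>
      (PySem.List.pyRange (i + 1) l.length 1).any (fun j =>
        decide (|PySem.List.pyGetD l i 0 - PySem.List.pyGetD l j 0| < d))) = true)
    ↔ ¬ l.Pairwise (fun a b => d ≤ |a - b|) := by
  rw [List.pairwise_iff_getElem]
  push Not
  simp only [List.any_eq_true, PySem.List.mem_pyRange_one, decide_eq_true_eq]
  constructor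
  · rintro ⟨i, ⟨hi0, hin⟩, j, ⟨hij, hjn⟩, hd⟩
    rw [PySem.List.pyGetD_eq_getElem l 0 hi0 hin,
        PySem.List.pyGetD_eq_getElem l 0 (by omega) hjn] at hd
    exact ⟨i.toNat, j.toNat, by omega, by omega, by omega, by omega⟩
  · rintro ⟨i, j, hi, hj, hij, hd⟩
    refine ⟨(i : Int), ⟨by omega, by omega⟩, (j : Int), ⟨by omega, by omega⟩, ?_⟩
    rw [PySem.List.pyGetD_eq_getElem l 0 (by omega) (by exact_mod_cast hi),
        PySem.List.pyGetD_eq_getElem l 0 (by omega) (by exact_mod_cast hj)]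
    simpa using hd

-- B's any() over zip(nums, nums[1:]) detects exactly an adjacent close pair
theorem vmd_B_char (s : List Int) (d : Int) :
    ((s.zip s.tail).any (fun p => decide (p.2 - p.1 < d)) = true)
    ↔ ∃ (i : Nat), ∃ (_ : i + 1 < s.length), s[i + 1] - s[i] < d := by
  simp only [List.any_eq_true, decide_eq_true_eq]
  constructor
  · rintro ⟨p, hp, hd⟩
    obtain ⟨i, hi, hpi⟩ := List.mem_iff_getElem.1 hp
    have hlen : i + 1 < s.length := by
      have := hi; rw [List.length_zip, List.length_tail] at this; omega
    refine ⟨i, hlen, ?_⟩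
    rw [List.getElem_zip, List.getElem_tail] at hpi
    rw [← hpi] at hd
    exact hd
  · rintro ⟨i, hlen, hd⟩
    refine ⟨(s[i], s[i + 1]), ?_, hd⟩
    apply List.mem_iff_getElem.2
    refine ⟨i, by rw [List.length_zip, List.length_tail]; omega, ?_⟩
    rw [List.getElem_zip, List.getElem_tail]

-- an out-of-order ("close") pair exists somewhere iff an adjacent one exists in the sorted list
theorem vmd_sorted_bridge (l : List Int) (d : Int) :
    (¬ (PySem.List.sorted l (fun x => x) false).Pairwise (fun a b => d ≤ |a - b|))
    ↔ ∃ (i : Nat), ∃ (_ : i + 1 < (PySem.List.sorted l (fun x => x) false).length),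
        (PySem.List.sorted l (fun x => x) false)[i + 1] - (PySem.List.sorted l (fun x => x) false)[i] < d := by
  rw [List.pairwise_iff_getElem]
  push Not
  constructor
  · rintro ⟨i, j, hi, hj, hij, hd⟩
    have hmono := PySem.List.sorted_id_getElem_mono l (p := i) (q := j) (by omega) hj
    have hmono2 := PySem.List.sorted_id_getElem_mono l (p := i + 1) (q := j) (by omega) hj
    refine ⟨i, by omega, ?_⟩
    have : |(PySem.List.sorted l (fun x => x) false)[i] - (PySem.List.sorted l (fun x => x) false)[j]|
        = (PySem.List.sorted l (fun x => x) false)[j] - (PySem.List.sorted l (fun x => x) false)[i] := by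
      rw [abs_sub_comm]; exact abs_of_nonneg (by omega)
    omega
  · rintro ⟨i, hlen, hd⟩
    have hmono := PySem.List.sorted_id_getElem_mono l (p := i) (q := i + 1) (by omega) hlen
    refine ⟨i, i + 1, by omega, hlen, by omega, ?_⟩
    have : |(PySem.List.sorted l (fun x => x) false)[i] - (PySem.List.sorted l (fun x => x) false)[i + 1]|
        = (PySem.List.sorted l (fun x => x) false)[i + 1] - (PySem.List.sorted l (fun x => x) false)[i] := by
      rw [abs_sub_comm]; exact abs_of_nonneg (by omega)
    omega

-- ===== VERDICT (by name: the statement is the Claim_ definition above) =====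
theorem violates_min_distance_spec : Claim_equal_violates_min_distance := by
  intro cm d _
  unfold Spec_violates_min_distance violates_min_distance violates_min_distance_alt
  dsimp only
  rw [PySem.List.foldl_append_eq_flatten, List.nil_append, PySem.List.slice_from_one]
  set l := cm.flatten with hl
  set s := PySem.List.sorted l (fun x => x) false with hs
  have hperm : s.Perm l := PySem.List.sorted_perm l (fun x => x) false
  have hsym : ∀ {x y : Int}, (fun a b => d ≤ |a - b|) x y → (fun a b => d ≤ |a - b|) y x := by
    intro x y h; simpa [abs_sub_comm] using h
  rcases Bool.eq_false_or_eq_true ((s.zip s.tail).any (fun p => decide (p.2 - p.1 < d))) with hB | hB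
  · rw [hB]
    rw [vmd_A_char, List.Perm.pairwise_iff hsym hperm.symm, vmd_sorted_bridge, ← vmd_B_char]
    exact hB
  · rw [hB]
    rw [← Bool.not_eq_true]
    rw [vmd_A_char]
    intro hcon
    rw [List.Perm.pairwise_iff hsym hperm.symm, vmd_sorted_bridge, ← vmd_B_char] at hcon
    have hB' : (((PySem.List.sorted l (fun x => x) false).zip
        (PySem.List.sorted l (fun x => x) false).tail).any (fun p => decide (p.2 - p.1 < d))) = false := hB
    rw [hB'] at hcon
    exact Bool.false_ne_true hcon
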